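-- pv_equiv track=rewrite | github.com/Huawei/FusionStorage_OpenStack_Driver | Cinder/Mitaka/dsware.py | _dsware_get_last_backup
-- ===== SOURCE A (Python) =====
-- def _dsware_get_last_backup(backup_list):
--     last_backup = None
--     if backup_list:
--         for back_tmp in backup_list:
--             if (back_tmp['status'] != "available") and (
--                     back_tmp['status'] != "restoring"):
--                 continue
--             if not last_backup:
--                 last_backup = back_tmp
--             if last_backup['created_at'] < back_tmp['created_at']:
--                 last_backup = back_tmp
--
--     return last_backup
-- ===== SOURCE B (Python) =====
-- def _dsware_get_last_backup(backup_list):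
--     if not backup_list:
--         return None
--     candidates = [b for b in backup_list
--                   if b['status'] in ('available', 'restoring')]
--     if not candidates:
--         return None
--     return sorted(candidates, key=lambda b: b['created_at'], reverse=True)[0]
-- ===== Notes on version B (the rewrite author's own statement) =====
-- stated objective: alternative
-- what changed: Replaces the single running-max scan over the whole list with filter-the-candidates, stable descending sort by created_at, and taking the first element (same first-maximum tie-breaking).
import Mathlib
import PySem

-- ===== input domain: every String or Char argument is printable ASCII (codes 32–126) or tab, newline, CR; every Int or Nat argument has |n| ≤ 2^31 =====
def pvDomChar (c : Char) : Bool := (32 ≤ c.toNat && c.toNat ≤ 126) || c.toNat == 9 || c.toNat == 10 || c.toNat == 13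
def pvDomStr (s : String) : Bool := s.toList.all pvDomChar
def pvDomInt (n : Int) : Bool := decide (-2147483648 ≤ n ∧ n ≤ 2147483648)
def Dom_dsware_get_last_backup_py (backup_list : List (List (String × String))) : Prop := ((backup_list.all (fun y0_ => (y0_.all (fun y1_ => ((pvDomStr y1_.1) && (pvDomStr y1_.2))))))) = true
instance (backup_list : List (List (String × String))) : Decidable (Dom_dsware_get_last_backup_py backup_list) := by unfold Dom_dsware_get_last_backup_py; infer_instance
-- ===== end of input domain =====

-- B replaces A's single running-max scan with filter + stable descending sort by created_at + take first (same result, alternative algorithm).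


-- ===== PORT A =====
-- A-side helper: one iteration of A's for-loop body ('continue', falsy check on last_backup, strict < comparison)
def pvStepA (last_backup : Option (List (String × String))) (back_tmp : List (String × String)) : Option (List (String × String)) :=
  if ((PySem.Dict.get? (PySem.Dict.mk back_tmp) "status").getD "" ≠ "available") ∧ ((PySem.Dict.get? (PySem.Dict.mk back_tmp) "status").getD "" ≠ "restoring") then
    last_backup
  else
    let last1 := if (match last_backup with | none => true | some d => d.isEmpty) then some back_tmp else last_backup
    match last1 with
    | none => none
    | some d => if (PySem.Dict.get? (PySem.Dict.mk d) "created_at").getD "" < (PySem.Dict.get? (PySem.Dict.mk back_tmp) "created_at").getD "" then some back_tmp else some d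

def dsware_get_last_backup_py (backup_list : List (List (String × String))) : Option (List (String × String)) :=
  if backup_list = [] then none
  else backup_list.foldl pvStepA none

-- ===== PORT B =====
-- B-side helper: b['status'] in ('available', 'restoring')
def pvIsCand (b : List (String × String)) : Bool :=
  ((PySem.Dict.get? (PySem.Dict.mk b) "status").getD "" == "available") || ((PySem.Dict.get? (PySem.Dict.mk b) "status").getD "" == "restoring")

def dsware_get_last_backup_py_alt (backup_list : List (List (String × String))) : Option (List (String × String)) :=
  if backup_list = [] then none
  else
    let candidates := backup_list.filter pvIsCand
    if candidates = [] then none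
    else PySem.List.pyGet? (PySem.List.sorted candidates (fun b => (PySem.Dict.get? (PySem.Dict.mk b) "created_at").getD "") true) 0

-- ===== PRECONDITION & SPEC =====
-- Pre_ excludes exactly the inputs where Python A raises KeyError: an element with no 'status' key,
-- or an available/restoring element with no 'created_at' key.
def Pre_dsware_get_last_backup_py (backup_list : List (List (String × String))) : Prop :=
  ∀ b ∈ backup_list, (PySem.Dict.get? (PySem.Dict.mk b) "status").isSome = true ∧
    (((PySem.Dict.get? (PySem.Dict.mk b) "status").getD "" = "available" ∨ (PySem.Dict.get? (PySem.Dict.mk b) "status").getD "" = "restoring") →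
      (PySem.Dict.get? (PySem.Dict.mk b) "created_at").isSome = true)
instance (backup_list : List (List (String × String))) : Decidable (Pre_dsware_get_last_backup_py backup_list) := by unfold Pre_dsware_get_last_backup_py; infer_instance

def pvWitness_dsware_get_last_backup_py : (List (List (String × String))) :=
  [[("status", "available"), ("created_at", "2020-01-01")], [("status", "error")]]

def Spec_dsware_get_last_backup_py (backup_list : List (List (String × String))) (out : Option (List (String × String))) : Prop := out = dsware_get_last_backup_py_alt backup_list
instance (backup_list : List (List (String × String))) (out : Option (List (String × String))) : Decidable (Spec_dsware_get_last_backup_py backup_list out) := by unfold Spec_dsware_get_last_backup_py; infer_instance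

-- ===== CLAIM (what is proved, stated in full; the proofs are below) =====
def Claim_equal_dsware_get_last_backup_py : Prop := ∀ (backup_list : List (List (String × String))), Dom_dsware_get_last_backup_py backup_list → Pre_dsware_get_last_backup_py backup_list → Spec_dsware_get_last_backup_py backup_list (dsware_get_last_backup_py backup_list)

-- ===== LEMMAS AND PROOFS =====

-- proof-side abbreviations
def pvKey (b : List (String × String)) : String := (PySem.Dict.get? (PySem.Dict.mk b) "created_at").getD ""

-- the 'first maximum' step the max-scan and the sort head both compute
def pvStepM (o : Option (List (String × String))) (b : List (String × String)) : Option (List (String × String)) :=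
  some (match o with | none => b | some d => if pvKey d < pvKey b then b else d)

lemma pv_get_status_ne_nil (b : List (String × String)) (h : (PySem.Dict.get? (PySem.Dict.mk b) "status").isSome = true) : b ≠ [] := by
  intro hb; subst hb; simp [PySem.Dict.get?] at h

lemma pv_head_insertBy (x : List (String × String)) (ys : List (List (String × String))) :
    (PySem.List.insertBy (fun a b => decide (pvKey b < pvKey a)) x ys).head? =
      pvStepM ys.head? x := by
  cases ys with
  | nil => simp [PySem.List.insertBy, pvStepM]
  | cons y t =>
      by_cases h : pvKey y < pvKey x
      · simp [PySem.List.insertBy, h, pvStepM]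
      · simp [PySem.List.insertBy, h, pvStepM]

lemma pv_foldl_insertBy_head (cs : List (List (String × String))) :
    ∀ acc : List (List (String × String)),
      (cs.foldl (fun acc x => PySem.List.insertBy (fun a b => decide (pvKey b < pvKey a)) x acc) acc).head? =
        cs.foldl pvStepM acc.head? := by
  induction cs with
  | nil => intro acc; simp
  | cons x t ih =>
      intro acc
      simp only [List.foldl_cons]
      rw [ih, pv_head_insertBy]

lemma pv_foldl_stepA_filter (l : List (List (String × String)))
    (hpre : ∀ b ∈ l, (PySem.Dict.get? (PySem.Dict.mk b) "status").isSome = true) :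
    ∀ s : Option (List (String × String)), (s = none ∨ ∃ d, s = some d ∧ d ≠ []) →
      l.foldl pvStepA s = (l.filter pvIsCand).foldl pvStepM s := by
  induction l with
  | nil => intro s _; rfl
  | cons b t ih =>
      intro s hs
      have hb := hpre b (by simp)
      have hbne : b ≠ [] := pv_get_status_ne_nil b hb
      have ht : ∀ x ∈ t, (PySem.Dict.get? (PySem.Dict.mk x) "status").isSome = true := fun x hx => hpre x (by simp [hx])
      by_cases hc : pvIsCand b = true
      · have hcond : ¬ (((PySem.Dict.get? (PySem.Dict.mk b) "status").getD "" ≠ "available") ∧ ((PySem.Dict.get? (PySem.Dict.mk b) "status").getD "" ≠ "restoring")) := by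
          simp [pvIsCand] at hc
          tauto
        have hstep : pvStepA s b = pvStepM s b := by
          rcases hs with rfl | ⟨d, rfl, hd⟩
          · simp [pvStepA, hcond, pvStepM]
          · have hde : d.isEmpty = false := by
              cases d with
              | nil => exact absurd rfl hd
              | cons p q => rfl
            simp [pvStepA, hcond, pvStepM, pvKey, hde]
            split_ifs <;> rfl
        rw [List.foldl_cons, List.filter_cons_of_pos hc, List.foldl_cons, hstep]
        apply ih ht
        right
        rcases hs with rfl | ⟨d, rfl, hdne⟩
        · exact ⟨b, rfl, hbne⟩
        · by_cases hlt : pvKey d < pvKey b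
          · exact ⟨b, by show some (if pvKey d < pvKey b then b else d) = some b; rw [if_pos hlt], hbne⟩
          · exact ⟨d, by show some (if pvKey d < pvKey b then b else d) = some d; rw [if_neg hlt], hdne⟩
      · have hcond : ((PySem.Dict.get? (PySem.Dict.mk b) "status").getD "" ≠ "available") ∧ ((PySem.Dict.get? (PySem.Dict.mk b) "status").getD "" ≠ "restoring") := by
          simp [pvIsCand] at hc
          tauto
        have hstep : pvStepA s b = s := by simp [pvStepA, hcond]
        rw [List.foldl_cons, List.filter_cons_of_neg (by simp [hc]), hstep]
        exact ih ht s hs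

lemma pv_pyGet_zero_eq_head (l : List (List (String × String))) (h : l ≠ []) :
    PySem.List.pyGet? l 0 = l.head? := by
  cases l with
  | nil => exact absurd rfl h
  | cons x t => simp [PySem.List.pyGet?, PySem.List.pyIdx?]

-- ===== VERDICT (by name: the statement is the Claim_ definition above) =====
theorem dsware_get_last_backup_py_spec : Claim_equal_dsware_get_last_backup_py := by
  intro backup_list _ hpre
  unfold Spec_dsware_get_last_backup_py dsware_get_last_backup_py dsware_get_last_backup_py_alt
  by_cases hnil : backup_list = []
  · simp [hnil]
  · simp only [hnil, if_false]
    have hstatus : ∀ b ∈ backup_list, (PySem.Dict.get? (PySem.Dict.mk b) "status").isSome = true :=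
      fun b hb => (hpre b hb).1
    rw [pv_foldl_stepA_filter backup_list hstatus none (Or.inl rfl)]
    by_cases hcand : backup_list.filter pvIsCand = []
    · simp [hcand]
    · simp only [hcand, if_false]
      have hsne : PySem.List.sorted (backup_list.filter pvIsCand) (fun b => (PySem.Dict.get? (PySem.Dict.mk b) "created_at").getD "") true ≠ [] := by
        intro h
        exact hcand ((PySem.List.sorted_eq_nil_iff _ _ _).1 h)
      rw [pv_pyGet_zero_eq_head _ hsne]
      have : PySem.List.sorted (backup_list.filter pvIsCand) (fun b => (PySem.Dict.get? (PySem.Dict.mk b) "created_at").getD "") true =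
          (backup_list.filter pvIsCand).foldl (fun acc x => PySem.List.insertBy (fun a b => decide (pvKey b < pvKey a)) x acc) [] := by
        rw [PySem.List.sorted_rev_eq_foldl_insertBy]
        rfl
      rw [this, pv_foldl_insertBy_head]
      rfl
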